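-- pv_equiv track=rewrite | github.com/6306022610113/INE_Problem | test/CapitalFront.py | capToFront
-- ===== SOURCE A (Python) =====
-- def capToFront(x):
--     cap1,cap2 = '',''
--     for i in x:
--         if i.isupper():
--             cap1 += i
--         else:
--             cap2 += i
--     return cap1 + cap2
-- ===== SOURCE B (Python) =====
-- def capToFront(x):
--     return ''.join(sorted(x, key=lambda c: not c.isupper()))
-- ===== Notes on version B (the rewrite author's own statement) =====
-- stated objective: idiomatic
-- what changed: Replaces the explicit two-accumulator partition loop with a stable sort keyed on whether the character fails to be uppercase, so uppercase characters come first in original order and the rest follow in original order.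
import Mathlib
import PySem

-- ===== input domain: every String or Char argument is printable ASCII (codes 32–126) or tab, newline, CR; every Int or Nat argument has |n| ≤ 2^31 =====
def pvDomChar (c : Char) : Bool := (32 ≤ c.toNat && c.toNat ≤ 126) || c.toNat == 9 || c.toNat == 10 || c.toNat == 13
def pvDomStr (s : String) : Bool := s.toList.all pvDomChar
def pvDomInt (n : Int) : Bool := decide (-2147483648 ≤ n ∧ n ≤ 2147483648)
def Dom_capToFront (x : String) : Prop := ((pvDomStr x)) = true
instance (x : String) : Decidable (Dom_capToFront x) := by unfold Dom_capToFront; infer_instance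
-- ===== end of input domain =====

-- B replaces A's explicit two-accumulator partition loop with a stable sort on the
-- boolean key 'not c.isupper()' (idiomatic one-liner; same return value, no side effects).

-- ===== PORT A =====
-- the two string accumulators cap1, cap2 are carried as lists of chars; '+= i' is '++ [i]'
def capToFront (x : String) : String :=
  let p := x.toList.foldl
    (fun (acc : List Char × List Char) i =>
      if PySem.Chars.isupper i then (acc.1 ++ [i], acc.2) else (acc.1, acc.2 ++ [i]))
    ([], [])
  String.ofList (p.1 ++ p.2)

-- ===== PORT B =====
-- ''.join(sorted(x, key=lambda c: not c.isupper()))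
def capToFront_alt (x : String) : String :=
  String.ofList (PySem.List.sorted x.toList (fun c => !(PySem.Chars.isupper c)) false)

-- ===== PRECONDITION & SPEC =====
def Spec_capToFront (x : String) (out : String) : Prop := out = capToFront_alt x
instance (x : String) (out : String) : Decidable (Spec_capToFront x out) := by unfold Spec_capToFront; infer_instance

-- ===== CLAIM (what is proved, stated in full; the proofs are below) =====
def Claim_equal_capToFront : Prop := ∀ (x : String), Dom_capToFront x → Spec_capToFront x (capToFront x)

-- ===== LEMMAS AND PROOFS =====

-- Inserting an element with key false (before = key-<) into U ++ L, where all of U has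
-- key false and all of L has key true, places it right between U and L (stability).
theorem insertBy_false_append {α : Type} (key : α → Bool) (x : α) (U L : List α)
    (hx : key x = false) (hU : ∀ u ∈ U, key u = false) (hL : ∀ l ∈ L, key l = true) :
    PySem.List.insertBy (fun a b => decide (key a < key b)) x (U ++ L) = U ++ x :: L := by
  induction U with
  | nil =>
    cases L with
    | nil => simp [PySem.List.insertBy]
    | cons l L' =>
      have : key l = true := hL l (by simp)
      simp [PySem.List.insertBy, hx, this]
  | cons u U' ih =>
    have hu : key u = false := hU u (by simp)
    simp only [List.cons_append, PySem.List.insertBy, hx, hu]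
    simp [ih (fun v hv => hU v (by simp [hv]))]

-- The insertion-sort fold with a boolean key keeps the accumulator partitioned:
-- false-key elements in original order, then true-key elements in original order.
theorem foldl_insertBy_bool {α : Type} (key : α → Bool) (xs : List α) :
    ∀ (U L : List α), (∀ u ∈ U, key u = false) → (∀ l ∈ L, key l = true) →
    xs.foldl (fun acc x => PySem.List.insertBy (fun a b => decide (key a < key b)) x acc) (U ++ L)
      = (U ++ xs.filter (fun a => !key a)) ++ (L ++ xs.filter key) := by
  induction xs with
  | nil => intro U L _ _; simp
  | cons x xs ih =>
    intro U L hU hL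
    by_cases hx : key x = true
    · have hb : PySem.List.insertBy (fun a b => decide (key a < key b)) x (U ++ L)
          = (U ++ L) ++ [x] := by
        apply PySem.List.insertBy_of_forall_not_before
        intro y _hy
        simp [hx]
      have := ih U (L ++ [x]) hU (by
        intro l hl
        rcases List.mem_append.mp hl with h | h
        · exact hL l h
        · simp at h; simpa [h] using hx)
      simp only [List.foldl_cons, hb, List.append_assoc] at this ⊢
      simp only [this]
      simp [hx]
    · have hx' : key x = false := by simpa using hx
      have hb := insertBy_false_append key x U L hx' hU hL
      have := ih (U ++ [x]) L (by
        intro u hu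
        rcases List.mem_append.mp hu with h | h
        · exact hU u h
        · simp at h; simpa [h] using hx') hL
      simp only [List.foldl_cons, hb]
      have hUL : U ++ x :: L = (U ++ [x]) ++ L := by simp
      rw [hUL, this]
      simp [hx']

-- A's partition fold, characterised by filters.
theorem capToFront_foldl (xs : List Char) : ∀ (a b : List Char),
    xs.foldl
      (fun (acc : List Char × List Char) i =>
        if PySem.Chars.isupper i then (acc.1 ++ [i], acc.2) else (acc.1, acc.2 ++ [i]))
      (a, b)
      = (a ++ xs.filter (fun c => PySem.Chars.isupper c),
         b ++ xs.filter (fun c => !PySem.Chars.isupper c)) := by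
  induction xs with
  | nil => intro a b; simp
  | cons x xs ih =>
    intro a b
    by_cases hx : PySem.Chars.isupper x = true
    · simp [hx, ih]
    · have hx' : PySem.Chars.isupper x = false := by simpa using hx
      simp [hx', ih]

-- B's stable boolean-key sort is exactly the partition: key-false (uppercase) first.
theorem sorted_bool_key (xs : List Char) :
    PySem.List.sorted xs (fun c => !(PySem.Chars.isupper c)) false
      = xs.filter (fun c => PySem.Chars.isupper c)
        ++ xs.filter (fun c => !PySem.Chars.isupper c) := by
  rw [PySem.List.sorted_eq_foldl_insertBy]
  have := foldl_insertBy_bool (fun c => !(PySem.Chars.isupper c)) xs [] []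
    (by simp) (by simp)
  simp only [List.nil_append, List.append_nil] at this
  rw [this]
  simp

-- ===== VERDICT (by name: the statement is the Claim_ definition above) =====
theorem capToFront_spec : Claim_equal_capToFront := by
  intro x _
  unfold Spec_capToFront capToFront capToFront_alt
  rw [sorted_bool_key, capToFront_foldl]
  simp
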